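-- pv_equiv track=rewrite | github.com/joyce-lam/prep | math/Q5.py | solve
-- ===== SOURCE A (Python) =====
-- from itertools import product
--
-- def solve(A, B, C):
--     if A == [] or B > len(str(C)):
--         return 0
--
--     elif B < len(str(C)):
--         if B == 1:
--             return len(A)
--
--         else:
--             candidates = product((str(i) for i in A), repeat = B)
--             return sum(x[0] != '0' for x in candidates)
--     elif B == len(str(C)):
--
--         if B == 1:
--             return sum(i < C for i in A)
--         else:
--             candidates = product((str(i) for i in A), repeat = B)
--             return sum(x[0] != '0' and int(''.join(x)) < C for x in candidates)
-- ===== SOURCE B (Python) =====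
-- def solve(A, B, C):
--     L = len(str(C))
--     n = len(A)
--     if n == 0 or B > L:
--         return 0
--     if B == 1:
--         return n if B < L else sum(1 for i in A if i < C)
--     if B < L:
--         # closed form: first position any non-zero element, the rest free
--         return sum(1 for i in A if i != 0) * n ** (B - 1)
--     # B == L >= 2: depth-first count over DISTINCT decimal strings with multiplicities
--     cnt = {}
--     for a in A:
--         s = str(a)
--         cnt[s] = cnt.get(s, 0) + 1
--     def rec(k, prefix):
--         if k == B:
--             return 1 if int(prefix) < C else 0
--         total = 0
--         for s, m in cnt.items():
--             if k == 0 and s == '0':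
--                 continue
--             total += m * rec(k + 1, prefix + s)
--         return total
--     return rec(0, '')
-- ===== Notes on version B (the rewrite author's own statement) =====
-- stated objective: alternative
-- what changed: B never materialises the itertools.product enumeration: the B < len(str(C)) branch becomes a closed-form count (nonzero elements times len(A)^(B-1)) and the B == len(str(C)) branch a multiplicity-weighted depth-first count over the distinct decimal strings of A.
import Mathlib
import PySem

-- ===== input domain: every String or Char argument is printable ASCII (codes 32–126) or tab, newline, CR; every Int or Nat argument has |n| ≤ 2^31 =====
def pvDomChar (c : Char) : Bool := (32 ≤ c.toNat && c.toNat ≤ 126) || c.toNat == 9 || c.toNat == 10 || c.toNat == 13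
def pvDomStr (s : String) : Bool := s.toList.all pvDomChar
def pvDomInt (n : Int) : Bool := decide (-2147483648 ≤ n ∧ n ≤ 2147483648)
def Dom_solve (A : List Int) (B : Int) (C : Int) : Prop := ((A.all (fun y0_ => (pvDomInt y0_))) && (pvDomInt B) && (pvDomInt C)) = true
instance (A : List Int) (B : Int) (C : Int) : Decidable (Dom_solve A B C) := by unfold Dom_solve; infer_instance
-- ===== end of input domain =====

-- B replaces the exhaustive itertools.product enumeration by a closed-form count in the
-- B < len(str(C)) branch and a multiplicity-weighted depth-first count over distinct decimal
-- strings in the B == len(str(C)) branch (objective: alternative).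

-- ===== PORT A =====
-- itertools.product(pool, repeat = r): all length-r tuples over pool, first coordinate varying slowest
def pyProd (pool : List String) : Nat → List (List String)
  | 0 => [[]]
  | Nat.succ r => pool.flatMap (fun x => (pyProd pool r).map (fun t => x :: t))

def solve (A : List Int) (B : Int) (C : Int) : Int :=
  if A = [] ∨ B > PySem.Str.len (PySem.Int.toStr C) then 0
  else if B < PySem.Str.len (PySem.Int.toStr C) then
    if B = 1 then (A.length : Int)
    else ((pyProd (A.map PySem.Int.toStr) B.toNat).map
        (fun x => if PySem.List.pyGetD x 0 "" ≠ "0" then (1 : Int) else 0)).sum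
  else
    if B = 1 then (A.map (fun i => if i < C then (1 : Int) else 0)).sum
    else ((pyProd (A.map PySem.Int.toStr) B.toNat).map
        (fun x => if PySem.List.pyGetD x 0 "" ≠ "0" ∧
            (PySem.Int.ofStr? (PySem.Str.join "" x)).getD 0 < C then (1 : Int) else 0)).sum

-- ===== PORT B =====
-- cnt = {}; for a in A: s = str(a); cnt[s] = cnt.get(s, 0) + 1
def cntDict (A : List Int) : PySem.Dict String Int :=
  A.foldl (fun d a => d.insert (PySem.Int.toStr a) (d.getD (PySem.Int.toStr a) 0 + 1))
    PySem.Dict.empty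

-- rec(k, prefix): fuel r = B - k picks remaining; the leading-zero skip fires at k == 0 (r + 1 = b)
def recCount (items : List (String × Int)) (C : Int) (b : Nat) : Nat → String → Int
  | 0, pre => if (PySem.Int.ofStr? pre).getD 0 < C then 1 else 0
  | Nat.succ r, pre =>
      items.foldl (fun total sm =>
        total + (if r + 1 = b ∧ sm.1 = "0" then 0
                 else sm.2 * recCount items C b r (pre ++ sm.1))) 0

def solve_alt (A : List Int) (B : Int) (C : Int) : Int :=
  let L := PySem.Str.len (PySem.Int.toStr C)
  if A.length = 0 ∨ B > L then 0
  else if B = 1 then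
    (if B < L then (A.length : Int) else (A.map (fun i => if i < C then (1 : Int) else 0)).sum)
  else if B < L then
    (A.map (fun i => if i ≠ 0 then (1 : Int) else 0)).sum * (A.length : Int) ^ (B - 1).toNat
  else
    recCount (cntDict A).items C B.toNat B.toNat ""

-- ===== PRECONDITION & SPEC =====
-- Pre_ excludes exactly the inputs where A raises: B ≤ 0 with A nonempty (product
-- with repeat 0 then x[0] → IndexError, negative repeat → ValueError), and the
-- B = len(str(C)) ≥ 2 branch with a negative element (int('…-…') → ValueError).
def Pre_solve (A : List Int) (B : Int) (C : Int) : Prop :=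
  A = [] ∨ (1 ≤ B ∧ (B = PySem.Str.len (PySem.Int.toStr C) ∧ 2 ≤ B → ∀ a ∈ A, 0 ≤ a))
instance (A : List Int) (B : Int) (C : Int) : Decidable (Pre_solve A B C) := by
  unfold Pre_solve; infer_instance

def pvWitness_solve : List Int × Int × Int := ([1, 0, 2, 5], 2, 345)

def Spec_solve (A : List Int) (B : Int) (C : Int) (out : Int) : Prop := out = solve_alt A B C
instance (A : List Int) (B : Int) (C : Int) (out : Int) : Decidable (Spec_solve A B C out) := by
  unfold Spec_solve; infer_instance

-- ===== CLAIM (what is proved, stated in full; the proofs are below) =====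
def Claim_equal_solve : Prop := ∀ (A : List Int) (B : Int) (C : Int),
  Dom_solve A B C → Pre_solve A B C → Spec_solve A B C (solve A B C)

-- ===== LEMMAS AND PROOFS =====

-- str(C) is never empty
lemma toDigitsCore_len_ge (b : Nat) : ∀ (f n : Nat) (l : List Char),
    l.length ≤ (Nat.toDigitsCore b f n l).length := by
  intro f
  induction f with
  | zero => intro n l; simp [Nat.toDigitsCore]
  | succ f ih =>
    intro n l
    simp only [Nat.toDigitsCore]
    split
    · simp
    · exact le_trans (by simp) (ih (n / b) (Nat.digitChar (n % b) :: l))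

lemma toDigitsCore_ne_nil (b : Nat) (f n : Nat) (hf : 0 < f) :
    Nat.toDigitsCore b f n [] ≠ [] := by
  cases f with
  | zero => omega
  | succ f =>
    simp only [Nat.toDigitsCore]
    split
    · simp
    · intro h
      have := toDigitsCore_len_ge b f (n / b) [Nat.digitChar (n % b)]
      rw [h] at this
      simp at this

lemma toDigits_ne_nil (b n : Nat) : Nat.toDigits b n ≠ [] :=
  toDigitsCore_ne_nil b (n + 1) n (by omega)

lemma one_le_strLen (C : Int) : 1 ≤ PySem.Str.len (PySem.Int.toStr C) := by
  rw [PySem.Str.len_eq, PySem.Int.toList_toStr]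
  unfold PySem.Int.toChars
  split
  · simp
  · have := toDigits_ne_nil 10 C.toNat
    have : 0 < (Nat.toDigits 10 C.toNat).length := List.length_pos_of_ne_nil this
    omega

-- str(a) == '0' exactly for a = 0
lemma toDigits_pos_ne_zero_char (n : Nat) (hn : 0 < n) : Nat.toDigits 10 n ≠ ['0'] := by
  unfold Nat.toDigits
  simp only [Nat.toDigitsCore]
  split
  · rename_i h
    intro hc
    have h10 : n < 10 := Nat.lt_of_div_eq_zero (by omega) h
    have hd : Nat.digitChar (n % 10) = '0' := (List.cons.inj hc).1
    rw [Nat.mod_eq_of_lt h10] at hd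
    interval_cases n <;> simp_all [Nat.digitChar]
  · intro hc
    have hgl := Nat.toDigitsCore_lens_eq 10 n (n / 10) (Nat.digitChar (n % 10)) []
    have hge := toDigitsCore_len_ge 10 n (n / 10) ([] : List Char)
    rw [hc] at hgl
    simp at hgl
    exact toDigitsCore_ne_nil 10 n (n / 10) (by omega) hgl

lemma toStr_eq_zero_iff (a : Int) : PySem.Int.toStr a = "0" ↔ a = 0 := by
  constructor
  · intro h
    have h1 : (PySem.Int.toStr a).toList = ("0" : String).toList := by rw [h]
    rw [PySem.Int.toList_toStr] at h1
    have h0 : ("0" : String).toList = ['0'] := by decide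
    rw [h0] at h1
    unfold PySem.Int.toChars at h1
    by_contra ha
    split at h1
    · exact absurd (List.cons.inj h1).1 (by decide)
    · rename_i hneg
      have hpos : 0 < a.toNat := by omega
      exact toDigits_pos_ne_zero_char a.toNat hpos h1
  · rintro rfl; decide

-- length of the product list
lemma pyProd_length (pool : List String) (r : Nat) :
    (pyProd pool r).length = pool.length ^ r := by
  induction r with
  | zero => simp [pyProd]
  | succ r ih => simp [pyProd, List.length_flatMap, ih, pow_succ, mul_comm]

lemma sum_flatMap {α : Type} (l : List α) (f : α → List Int) :
    (l.flatMap f).sum = (l.map (fun a => (f a).sum)).sum := by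
  induction l with
  | nil => simp
  | cons x xs ih => simp [ih]

-- generic flatMap shape of the product's sum
lemma pyProd_succ_sum (pool : List String) (r : Nat) (g : List String → Int) :
    ((pyProd pool (r + 1)).map g).sum
      = (pool.map (fun s => ((pyProd pool r).map (fun t => g (s :: t))).sum)).sum := by
  show ((pool.flatMap fun x => (pyProd pool r).map (x :: ·)).map g).sum = _
  rw [List.map_flatMap, sum_flatMap]
  simp [List.map_map, Function.comp_def]

-- sum over tuples of a function of the head
lemma pyProd_head_sum (pool : List String) (r : Nat) (f : String → Int) :
    ((pyProd pool (r + 1)).map (fun x => f (PySem.List.pyGetD x 0 ""))).sum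
      = (pool.map f).sum * (pool.length : Int) ^ r := by
  rw [pyProd_succ_sum]
  have hin : ∀ s : String,
      ((pyProd pool r).map (fun t => f (PySem.List.pyGetD (s :: t) 0 ""))).sum
        = f s * (pool.length : Int) ^ r := by
    intro s
    have : (fun t : List String => f (PySem.List.pyGetD (s :: t) 0 "")) = fun _ => f s := by
      funext t; rw [PySem.List.pyGetD_zero_cons]
    rw [this, List.map_const', List.sum_replicate, pyProd_length, nsmul_eq_mul]
    push_cast
    ring
  simp only [hin]
  simpa using List.sum_map_mul_right pool f ((pool.length : Int) ^ r)

-- the counter is PySem.Dict.counter of the mapped strings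
lemma cntDict_eq_counter (A : List Int) :
    cntDict A = PySem.Dict.counter (A.map PySem.Int.toStr) := by
  rw [← PySem.Dict.foldl_insert_getD_add_one_eq_counter, cntDict, List.foldl_map]

-- weighted sum over the counter's items = plain sum over the list
lemma counter_items_sum (xs : List String) (g : String → Int) :
    (((PySem.Dict.counter xs).items).map (fun sm => sm.2 * g sm.1)).sum
      = (xs.map g).sum := by
  rw [PySem.Dict.items_counter, List.map_map]
  have hn : (PySem.Set.ofList xs : List String).Nodup := PySem.Set.nodup_ofList xs
  have hm : ∀ k, k ∈ (PySem.Set.ofList xs : List String) ↔ k ∈ xs :=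
    fun k => PySem.Set.mem_ofList xs k
  have h1 : (((PySem.Set.ofList xs : List String)).map
        ((fun sm => sm.2 * g sm.1) ∘ fun k => (k, (List.count k xs : Int)))).sum
      = ∑ k ∈ ((PySem.Set.ofList xs : List String)).toFinset, (List.count k xs : Int) * g k := by
    exact (List.sum_toFinset _ hn).symm
  rw [h1]
  have hDF : ((PySem.Set.ofList xs : List String)).toFinset = xs.toFinset := by
    ext k; simp [List.mem_toFinset, hm]
  have h2 : (xs.map g).sum = ((↑xs : Multiset String).map g).sum := by simp
  rw [hDF, h2, Finset.sum_multiset_map_count]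
  simp

lemma intercalate_nil_char (l : List (List Char)) : List.intercalate [] l = l.flatten := by
  unfold List.intercalate
  induction l with
  | nil => simp
  | cons x xs ih =>
    cases xs with
    | nil => simp
    | cons y ys => simp_all [List.intersperse]

lemma foldl_append_toList (xs : List String) : ∀ (init : String),
    (xs.foldl (fun a b => a ++ b) init).toList = init.toList ++ (xs.map String.toList).flatten := by
  induction xs with
  | nil => intro init; simp
  | cons x xs ih => intro init; simp [ih, String.toList_append]

-- join with empty separator is fold of append
lemma join_empty_foldl (xs : List String) :
    PySem.Str.join "" xs = xs.foldl (fun a b => a ++ b) "" := by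
  apply String.toList_inj.mp
  rw [PySem.Str.join, String.toList_ofList, foldl_append_toList]
  have h0 : ("" : String).toList = [] := by decide
  simp [PySem.Chars.join, intercalate_nil_char, h0]

-- recCount below the top level counts all suffix tuples
lemma recCount_eq_sum (A : List Int) (C : Int) (b : Nat) :
    ∀ (r : Nat), r < b → ∀ (pre : String),
      recCount (cntDict A).items C b r pre
        = ((pyProd (A.map PySem.Int.toStr) r).map
            (fun t => if (PySem.Int.ofStr? (t.foldl (fun a s => a ++ s) pre)).getD 0 < C
                      then (1 : Int) else 0)).sum := by
  intro r
  induction r with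
  | zero =>
    intro _ pre
    simp [recCount, pyProd]
  | succ r ih =>
    intro hlt pre
    have hrb : ¬ (r + 1 = b) := by omega
    rw [recCount, PySem.List.foldl_add]
    simp only [hrb, false_and, if_false]
    rw [cntDict_eq_counter] at ih ⊢
    rw [counter_items_sum (A.map PySem.Int.toStr)
          (fun s => recCount (PySem.Dict.counter (A.map PySem.Int.toStr)).items C b r (pre ++ s)),
        zero_add]
    rw [pyProd_succ_sum, List.map_map, List.map_map]
    apply congrArg
    apply List.map_congr_left
    intro a _
    rw [Function.comp_apply, Function.comp_apply, ih (by omega) (pre ++ PySem.Int.toStr a)]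
    rfl

-- top level of recCount: leading-zero filter on, then all shorter tuples
lemma main_branch4 (A : List Int) (B C : Int) (hB2 : 2 ≤ B) :
    ((pyProd (A.map PySem.Int.toStr) B.toNat).map
        (fun x => if PySem.List.pyGetD x 0 "" ≠ "0" ∧
            (PySem.Int.ofStr? (PySem.Str.join "" x)).getD 0 < C then (1 : Int) else 0)).sum
      = recCount (cntDict A).items C B.toNat B.toNat "" := by
  have hm : B.toNat = (B.toNat - 1) + 1 := by omega
  set m : Nat := B.toNat - 1 with hmdef
  have hmlt : m < B.toNat := by omega
  -- unfold the top level of recCount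
  conv_rhs => rw [hm]
  rw [recCount, PySem.List.foldl_add, zero_add]
  have hfun : (fun sm : String × Int =>
        (if m + 1 = m + 1 ∧ sm.1 = "0" then (0 : Int)
         else sm.2 * recCount (cntDict A).items C (m + 1) m ("" ++ sm.1)))
      = fun sm : String × Int =>
        sm.2 * (if sm.1 = "0" then (0 : Int)
                else recCount (cntDict A).items C (m + 1) m ("" ++ sm.1)) := by
    funext sm
    by_cases h : sm.1 = "0"
    · simp [h]
    · simp [h]
  rw [hfun, cntDict_eq_counter,
      counter_items_sum (A.map PySem.Int.toStr)
        (fun s => (if s = "0" then (0 : Int)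
                   else recCount (PySem.Dict.counter (A.map PySem.Int.toStr)).items C (m + 1) m ("" ++ s)))]
  -- unfold the top level of the product sum
  conv_lhs => rw [hm]
  rw [pyProd_succ_sum]
  apply congrArg
  apply List.map_congr_left
  intro s _
  by_cases h0 : s = "0"
  · subst h0
    simp [PySem.List.pyGetD_zero_cons]
  · simp only [h0, if_false]
    have := recCount_eq_sum A C (m + 1) m (by omega) ("" ++ s)
    rw [cntDict_eq_counter] at this
    rw [this]
    apply congrArg
    apply List.map_congr_left
    intro t _
    rw [PySem.List.pyGetD_zero_cons, join_empty_foldl]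
    have hfold : (s :: t).foldl (fun a b => a ++ b) ""
        = t.foldl (fun a b => a ++ b) ("" ++ s) := rfl
    rw [hfold]
    simp [h0]

-- ===== VERDICT (by name: the statement is the Claim_ definition above) =====
theorem solve_spec : Claim_equal_solve := by
  intro A B C hDom hPre
  unfold Spec_solve solve solve_alt
  set L := PySem.Str.len (PySem.Int.toStr C) with hLdef
  have hL1 : 1 ≤ L := one_le_strLen C
  have hlen : (A.length = 0 ∨ B > L) ↔ (A = [] ∨ B > L) := by
    constructor
    · rintro (h | h)
      · exact Or.inl (List.length_eq_zero_iff.mp h)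
      · exact Or.inr h
    · rintro (h | h)
      · exact Or.inl (by simp [h])
      · exact Or.inr h
  by_cases h0 : A = [] ∨ B > L
  · rw [if_pos h0, if_pos (hlen.mpr h0)]
  · rw [if_neg h0, if_neg (fun h => h0 (hlen.mp h))]
    have hA : A ≠ [] := fun h => h0 (Or.inl h)
    have hBle : B ≤ L := by
      by_contra h
      exact h0 (Or.inr (by omega))
    have hB1 : 1 ≤ B := by
      rcases hPre with h | ⟨h1, _⟩
      · exact absurd h hA
      · exact h1
    by_cases hB : B = 1
    · subst hB
      by_cases hBL : (1 : Int) < L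
      · rw [if_pos hBL, if_pos rfl, if_pos rfl, if_pos hBL]
      · rw [if_neg hBL, if_pos rfl, if_pos rfl, if_neg hBL]
    · rw [if_neg hB]
      by_cases hBL : B < L
      · rw [if_pos hBL, if_neg hB, if_pos hBL]
        have hb : B.toNat = (B - 1).toNat + 1 := by omega
        rw [hb, pyProd_head_sum (A.map PySem.Int.toStr) ((B - 1).toNat)
              (fun s => if s ≠ "0" then (1 : Int) else 0)]
        rw [List.map_map, List.length_map]
        apply congrArg₂ _ _ rfl
        apply congrArg
        apply List.map_congr_left
        intro a _
        simp only [Function.comp_apply]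
        by_cases ha : a = 0
        · simp [ha, toStr_eq_zero_iff]
        · simp [ha, (toStr_eq_zero_iff a).not]
      · rw [if_neg hBL, if_neg hB, if_neg hB, if_neg hBL]
        exact main_branch4 A B C (by omega)
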